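-- pv_equiv track=rewrite | github.com/johnnyrayalt/python-scrabble-game | main3.py | update_hand
-- ===== SOURCE A (Python) =====
-- def update_hand(hand, word):
--     hand_copy = hand.copy()
--
--     def count_down_or_remove(copy):
--         copy[i] = copy.get(i, 0) - 1
--         if copy.get(i, 0) <= 0:
--             copy.pop(i)
--
--     for i in word.lower():
--         if i in hand_copy:
--             count_down_or_remove(hand_copy)
--         else:
--             count_down_or_remove(hand_copy)
--     return hand_copy
-- ===== SOURCE B (Python) =====
-- def update_hand(hand, word):
--     copy = hand.copy()
--     wc = {}
--     for ch in word.lower():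
--         wc[ch] = wc.get(ch, 0) + 1
--     for letter, n in wc.items():
--         new = copy.get(letter, 0) - n
--         if new <= 0:
--             copy.pop(letter, None)
--         else:
--             copy[letter] = new
--     return copy
-- ===== Notes on version B (the rewrite author's own statement) =====
-- stated objective: faster
-- what changed: B aggregates the word into a letter-frequency table once and then updates/removes each distinct letter with a single dict operation, instead of A's per-character decrement-and-pop loop (with its duplicated if/else branches and insert-then-pop churn for letters not in hand).
import Mathlib
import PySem

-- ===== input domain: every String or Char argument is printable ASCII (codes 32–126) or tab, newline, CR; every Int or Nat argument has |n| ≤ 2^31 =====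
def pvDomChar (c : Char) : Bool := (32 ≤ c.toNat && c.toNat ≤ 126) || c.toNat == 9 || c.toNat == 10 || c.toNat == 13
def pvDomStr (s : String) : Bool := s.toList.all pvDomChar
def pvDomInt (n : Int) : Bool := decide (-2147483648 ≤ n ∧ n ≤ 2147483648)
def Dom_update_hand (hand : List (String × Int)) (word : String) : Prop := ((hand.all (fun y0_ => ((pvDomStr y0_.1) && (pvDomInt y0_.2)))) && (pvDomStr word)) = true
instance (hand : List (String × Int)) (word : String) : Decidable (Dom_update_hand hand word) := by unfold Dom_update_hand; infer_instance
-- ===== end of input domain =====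

-- B aggregates the word into a letter-frequency table and updates each distinct letter once, instead of A's per-character decrement-and-pop loop; return-value equivalence (neither mutates its argument).


-- ===== PORT A =====
-- `copy.pop(i)` never raises here (the key `i` was assigned one line above), so it is exactly `erase`
def pvCountDownOrRemove (copy : PySem.Dict String Int) (i : String) : PySem.Dict String Int :=
  let copy := copy.insert i (copy.getD i 0 - 1)
  if copy.getD i 0 ≤ 0 then copy.erase i else copy

def update_hand (hand : List (String × Int)) (word : String) : List (String × Int) :=
  let hand_copy := PySem.Dict.ofList hand
  ((PySem.Str.lower word).toList.foldl
    (fun copy c =>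
      let i := String.ofList [c]
      if copy.contains i then pvCountDownOrRemove copy i else pvCountDownOrRemove copy i)
    hand_copy).items

-- ===== PORT B =====
def update_hand_alt (hand : List (String × Int)) (word : String) : List (String × Int) :=
  let copy := PySem.Dict.ofList hand
  let wc : PySem.Dict String Int :=
    (PySem.Str.lower word).toList.foldl
      (fun d c => d.insert (String.ofList [c]) (d.getD (String.ofList [c]) 0 + 1)) PySem.Dict.empty
  (wc.items.foldl
    (fun copy p =>
      let nw := copy.getD p.1 0 - p.2
      if nw ≤ 0 then copy.erase p.1 else copy.insert p.1 nw)
    copy).items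

-- ===== PRECONDITION & SPEC =====
def Spec_update_hand (hand : List (String × Int)) (word : String) (out : List (String × Int)) : Prop := out = update_hand_alt hand word
instance (hand : List (String × Int)) (word : String) (out : List (String × Int)) : Decidable (Spec_update_hand hand word out) := by unfold Spec_update_hand; infer_instance

-- ===== CLAIM (what is proved, stated in full; the proofs are below) =====
def Claim_equal_update_hand : Prop := ∀ (hand : List (String × Int)) (word : String), Dom_update_hand hand word → Spec_update_hand hand word (update_hand hand word)

-- ===== LEMMAS AND PROOFS =====


def pvStepA (d : PySem.Dict String Int) (i : String) : PySem.Dict String Int :=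
  if (d.insert i (d.getD i 0 - 1)).getD i 0 ≤ 0 then (d.insert i (d.getD i 0 - 1)).erase i
  else d.insert i (d.getD i 0 - 1)

def pvRes (l : List (String × Int)) (ls : List String) : List (String × Int) :=
  l.filterMap (fun p =>
    let c : Int := ls.count p.1
    if c = 0 ∨ 0 < p.2 - c then some (p.1, p.2 - c) else none)

lemma pvErase_nodup (d : PySem.Dict String Int) (k : String) (h : d.keys.Nodup) :
    (d.erase k).keys.Nodup := by
  apply List.Sublist.nodup ?_ h
  simp only [PySem.Dict.erase, PySem.Dict.keys]
  exact List.Sublist.map _ List.filter_sublist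

lemma pvStepA_nodup (d : PySem.Dict String Int) (i : String) (h : d.keys.Nodup) :
    (pvStepA d i).keys.Nodup := by
  unfold pvStepA
  have h' := PySem.Dict.nodup_keys_insert d i (d.getD i 0 - 1) h
  split
  · exact pvErase_nodup _ _ h'
  · exact h'

lemma pvNotContains_mem (d : PySem.Dict String Int) (k : String)
    (hc : d.contains k = false) : ∀ p ∈ d.items, p.1 ≠ k := by
  intro p hp
  simp only [PySem.Dict.contains, List.any_eq_false] at hc
  simpa using hc p hp

lemma pvStepA_not_contains (d : PySem.Dict String Int) (k : String)
    (hc : d.contains k = false) : pvStepA d k = d := by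
  unfold pvStepA
  have hi := PySem.Dict.items_insert_of_not_contains d (d.getD k 0 - 1) hc
  have hg : (d.insert k (d.getD k 0 - 1)).getD k 0 = d.getD k 0 - 1 :=
    PySem.Dict.getD_insert_self d k _ 0
  have hd0 : d.getD k 0 = 0 := PySem.Dict.getD_of_not_contains d 0 hc
  rw [hg, if_pos (by rw [hd0]; omega)]
  apply PySem.Dict.ext
  simp only [PySem.Dict.erase, hi]
  rw [List.filter_append]
  have h1 : d.items.filter (fun p => !p.1 == k) = d.items :=
    List.filter_eq_self.mpr (by intro p hp; simpa using pvNotContains_mem d k hc p hp)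
  simp [h1]

lemma pvStepA_res (d : PySem.Dict String Int) (k : String) (ls : List String)
    (h : d.keys.Nodup) : pvRes (pvStepA d k).items ls = pvRes d.items (k :: ls) := by
  cases hc : d.contains k with
  | false =>
    rw [pvStepA_not_contains d k hc]
    unfold pvRes
    apply List.filterMap_congr
    intro p hp
    obtain ⟨p1, p2⟩ := p
    have hne : p1 ≠ k := pvNotContains_mem d k hc (p1, p2) hp
    simp only [List.count_cons, beq_iff_eq, Ne.symm hne, if_false, add_zero]
  | true =>
    have hg : (d.insert k (d.getD k 0 - 1)).getD k 0 = d.getD k 0 - 1 :=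
      PySem.Dict.getD_insert_self d k _ 0
    have hi := PySem.Dict.items_insert_of_contains d (d.getD k 0 - 1) hc
    have hval : ∀ p ∈ d.items, p.1 = k → p.2 = d.getD k 0 := by
      intro p hp hpk
      have h2 : d.getD p.1 0 = p.2 := PySem.Dict.getD_of_mem_items d (by exact hp) h 0
      rw [hpk] at h2; omega
    unfold pvStepA
    rw [hg]
    by_cases hle : d.getD k 0 - 1 ≤ 0
    · rw [if_pos hle]
      unfold pvRes
      simp only [PySem.Dict.erase, hi]
      rw [List.filter_map]
      have hfil : (d.items.filter ((fun p => !p.1 == k) ∘ (fun p => if (p.1 == k) = true then (k, d.getD k 0 - 1) else p)))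
          = d.items.filter (fun p => !p.1 == k) := by
        apply List.filter_congr
        intro p hp
        by_cases hpk : p.1 = k <;> simp [hpk]
      rw [hfil]
      have hmapid : (d.items.filter (fun p => !p.1 == k)).map (fun p => if (p.1 == k) = true then (k, d.getD k 0 - 1) else p)
          = d.items.filter (fun p => !p.1 == k) := by
        apply List.map_congr_left ?_ |>.trans (List.map_id _)
        intro p hp
        have h3 := List.of_mem_filter hp
        simp at h3
        simp [h3]
      rw [hmapid, List.filterMap_filter]
      apply List.filterMap_congr
      intro p hp
      obtain ⟨p1, p2⟩ := p
      by_cases hpk : p1 = k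
      · subst hpk
        have hv := hval (p1, p2) hp rfl
        simp only at hv
        simp only [beq_self_eq_true, Bool.not_true, Bool.false_eq_true, if_false,
          List.count_cons_self]
        rw [if_neg (by push_cast; omega)]
      · simp only [beq_eq_false_iff_ne, ne_eq, hpk, not_false_eq_true, Bool.not_eq_true,
          List.count_cons, beq_iff_eq, Ne.symm hpk, if_false, add_zero]
        rw [if_pos (by simp [hpk])]
    · rw [if_neg hle]
      unfold pvRes
      rw [hi, List.filterMap_map]
      apply List.filterMap_congr
      intro p hp
      obtain ⟨p1, p2⟩ := p
      by_cases hpk : p1 = k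
      · subst hpk
        have hv := hval (p1, p2) hp rfl
        simp only at hv
        simp only [Function.comp, beq_self_eq_true, if_true, List.count_cons_self]
        subst hv
        push_cast
        split_ifs <;> first | rfl | (exfalso; omega) | (simp only [Option.some.injEq, Prod.mk.injEq, true_and]; omega)
      · simp only [Function.comp, beq_iff_eq, hpk, if_false, List.count_cons,
          Ne.symm hpk, add_zero]

lemma pvRes_nil (l : List (String × Int)) : pvRes l [] = l := by
  simp [pvRes]

lemma pvFoldA_items (ls : List String) (d : PySem.Dict String Int) (h : d.keys.Nodup) :
    (ls.foldl pvStepA d).items = pvRes d.items ls := by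
  induction ls generalizing d with
  | nil => simp [pvRes_nil]
  | cons k ls ih =>
    rw [List.foldl_cons, ih _ (pvStepA_nodup d k h), pvStepA_res d k ls h]

def pvStepB (d : PySem.Dict String Int) (p : String × Int) : PySem.Dict String Int :=
  if d.getD p.1 0 - p.2 ≤ 0 then d.erase p.1 else d.insert p.1 (d.getD p.1 0 - p.2)

lemma pvStepB_nodup (d : PySem.Dict String Int) (p : String × Int) (h : d.keys.Nodup) :
    (pvStepB d p).keys.Nodup := by
  unfold pvStepB
  split
  · exact pvErase_nodup _ _ h
  · exact PySem.Dict.nodup_keys_insert _ _ _ h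

def pvResP (l : List (String × Int)) (pairs : List (String × Int)) : List (String × Int) :=
  l.filterMap (fun q =>
    match pairs.find? (fun r => r.1 == q.1) with
    | none => some q
    | some r => if 0 < q.2 - r.2 then some (q.1, q.2 - r.2) else none)

lemma pvFoldB_items (pairs : List (String × Int)) (d : PySem.Dict String Int)
    (hd : d.keys.Nodup) (hk : (pairs.map Prod.fst).Nodup) (hpos : ∀ p ∈ pairs, 1 ≤ p.2) :
    (pairs.foldl pvStepB d).items = pvResP d.items pairs := by
  induction pairs generalizing d with
  | nil => simp [pvResP]
  | cons kc ps ih =>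
    obtain ⟨k, c⟩ := kc
    have hc1 : (1 : Int) ≤ c := hpos (k, c) (by simp)
    have hknotin : k ∉ ps.map Prod.fst := by
      simp only [List.map_cons, List.nodup_cons] at hk
      exact hk.1
    rw [List.foldl_cons,
      ih _ (pvStepB_nodup d (k, c) hd) (by simpa using hk.of_cons)
        (fun p hp => hpos p (List.mem_cons_of_mem _ hp))]
    have hval : ∀ p ∈ d.items, p.1 = k → p.2 = d.getD k 0 := by
      intro p hp hpk
      have h2 : d.getD p.1 0 = p.2 := PySem.Dict.getD_of_mem_items d (by exact hp) hd 0
      rw [hpk] at h2; omega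
    have hfind : ∀ q : String × Int, q.1 ≠ k →
        (((k, c) :: ps).find? (fun r => r.1 == q.1)) = ps.find? (fun r => r.1 == q.1) := by
      intro q hq
      rw [List.find?_cons_of_neg]
      simp [Ne.symm hq]
    unfold pvStepB
    by_cases hle : d.getD k 0 - c ≤ 0
    · rw [if_pos hle]
      unfold pvResP
      simp only [PySem.Dict.erase]
      rw [List.filterMap_filter]
      apply List.filterMap_congr
      intro q hq
      obtain ⟨q1, q2⟩ := q
      by_cases hqk : q1 = k
      · subst hqk
        have hv := hval (q1, q2) hq rfl
        simp only at hv
        simp only [beq_self_eq_true, Bool.not_true, Bool.false_eq_true, if_false]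
        rw [List.find?_cons_of_pos (h := by simp)]
        simp only
        rw [if_neg (by omega)]
      · rw [if_pos (by simp [hqk]), hfind (q1, q2) hqk]
    · rw [if_neg hle]
      have hcont : d.contains k = true := by
        cases hnc : d.contains k with
        | true => rfl
        | false =>
          have := PySem.Dict.getD_of_not_contains d 0 hnc
          omega
      unfold pvResP
      rw [PySem.Dict.items_insert_of_contains d _ hcont, List.filterMap_map]
      apply List.filterMap_congr
      intro q hq
      obtain ⟨q1, q2⟩ := q
      by_cases hqk : q1 = k
      · subst hqk
        have hv := hval (q1, q2) hq rfl
        simp only at hv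
        simp only [Function.comp, beq_self_eq_true, if_true]
        rw [List.find?_eq_none.mpr (by
          intro r hr
          simp only [beq_iff_eq]
          intro hrk
          exact hknotin (hrk ▸ List.mem_map_of_mem hr))]
        rw [List.find?_cons_of_pos (h := by simp)]
        simp only
        rw [if_pos (by omega), hv]
      · simp only [Function.comp, beq_iff_eq, hqk, if_false]
        rw [hfind (q1, q2) hqk]

lemma pvFind_beq (l : List String) (a : String) :
    l.find? (fun k => k == a) = if a ∈ l then some a else none := by
  induction l with
  | nil => simp
  | cons x xs ih =>
    by_cases hx : x = a
    · subst hx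
      rw [List.find?_cons_of_pos (h := by simp)]
      simp
    · rw [List.find?_cons_of_neg (h := by simp [hx]), ih]
      simp [Ne.symm hx]

lemma pvResP_counter (l : List (String × Int)) (ls : List String) :
    pvResP l ((PySem.Set.ofList ls).map (fun k => (k, (ls.count k : Int)))) = pvRes l ls := by
  unfold pvResP pvRes
  apply List.filterMap_congr
  intro q _
  rw [List.find?_map]
  have hcomp : ((fun r : String × Int => r.1 == q.1) ∘ fun k => (k, (ls.count k : Int)))
      = fun k => k == q.1 := rfl
  rw [hcomp, pvFind_beq]
  by_cases hm : q.1 ∈ ls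
  · have hm' : q.1 ∈ PySem.Set.ofList ls := (PySem.Set.mem_ofList ls q.1).mpr hm
    have hc0 : ls.count q.1 ≠ 0 := by simpa [List.count_eq_zero] using hm
    rw [if_pos hm']
    simp only [Option.map_some]
    have hiff : (0 < q.2 - (ls.count q.1 : Int)) ↔
        ((ls.count q.1 : Int) = 0 ∨ 0 < q.2 - (ls.count q.1 : Int)) := by omega
    rw [if_congr hiff rfl rfl]
  · have hm' : q.1 ∉ PySem.Set.ofList ls := fun h => hm ((PySem.Set.mem_ofList ls q.1).mp h)
    have hc0 : ls.count q.1 = 0 := List.count_eq_zero.mpr hm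
    rw [if_neg hm']
    simp [hc0]


-- ===== VERDICT (by name: the statement is the Claim_ definition above) =====
theorem update_hand_spec : Claim_equal_update_hand := by
  intro hand word _
  unfold Spec_update_hand
  refine Eq.symm ?_

  unfold update_hand update_hand_alt
  have hA : (fun (copy : PySem.Dict String Int) (c : Char) =>
      let i := String.ofList [c]
      if copy.contains i then pvCountDownOrRemove copy i else pvCountDownOrRemove copy i)
      = fun copy c => pvStepA copy (String.ofList [c]) := by
    funext copy c
    simp only [ite_self]
    rfl
  have hB : (fun (copy : PySem.Dict String Int) (p : String × Int) =>
      let nw := copy.getD p.1 0 - p.2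
      if nw ≤ 0 then copy.erase p.1 else copy.insert p.1 nw) = pvStepB := rfl
  rw [hA, hB]
  dsimp only
  set ls := (PySem.Str.lower word).toList.map (fun c => String.ofList [c]) with hls
  have h1 : (PySem.Str.lower word).toList.foldl (fun copy c => pvStepA copy (String.ofList [c]))
      (PySem.Dict.ofList hand) = ls.foldl pvStepA (PySem.Dict.ofList hand) := by
    rw [hls]
    exact (List.foldl_map (f := fun c => String.ofList [c]) (g := pvStepA)).symm
  have h2 : (PySem.Str.lower word).toList.foldl
      (fun d c => d.insert (String.ofList [c]) (d.getD (String.ofList [c]) 0 + 1)) PySem.Dict.empty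
      = PySem.Dict.counter ls := by
    rw [hls]
    exact ((List.foldl_map (f := fun c => String.ofList [c])
      (g := fun (d : PySem.Dict String Int) (x : String) => d.insert x (d.getD x 0 + 1))).symm).trans
      (PySem.Dict.foldl_insert_getD_add_one_eq_counter _)
  rw [h1, h2]
  rw [pvFoldA_items ls _ (PySem.Dict.nodup_keys_ofList hand)]
  rw [pvFoldB_items (PySem.Dict.counter ls).items _ (PySem.Dict.nodup_keys_ofList hand)
    (by
      rw [PySem.Dict.items_counter, List.map_map]
      rw [show (Prod.fst ∘ fun k : String => (k, (List.count k ls : Int))) = id from rfl,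
        List.map_id]
      exact PySem.Set.nodup_ofList ls)
    (by
      intro p hp
      rw [PySem.Dict.items_counter] at hp
      obtain ⟨k, hk, rfl⟩ := List.mem_map.mp hp
      have : k ∈ ls := (PySem.Set.mem_ofList ls k).mp hk
      have := List.count_pos_iff.mpr this
      simp only
      omega)]
  rw [PySem.Dict.items_counter, pvResP_counter]
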